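-- pv_equiv track=rewrite | github.com/E-wallace0001/Count-Sat | sat_test/auto_test.py | unique_count
-- ===== SOURCE A (Python) =====
-- def unique_count(this):
--     unique=[]
--     count=0
--     for i in range (0, len(this)):
--         for x in range( 0, len(this[i]) ):
--             if abs(this[i][x]) not in unique:
--                 count=count+1
--                 unique.append(abs(this[i][x]))
--     return(len(unique))
-- ===== SOURCE B (Python) =====
-- def unique_count(this):
--     vals = sorted(abs(x) for row in this for x in row)
--     if not vals:
--         return 0
--     count = 1
--     for i in range(1, len(vals)):
--         if vals[i] != vals[i - 1]:
--             count += 1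
--     return count
-- ===== Notes on version B (the rewrite author's own statement) =====
-- stated objective: alternative
-- what changed: Replaces A's nested loops with per-element membership scans over a growing unique list by flattening the abs values, sorting them once, and counting boundaries between adjacent unequal elements in a single linear scan.
import Mathlib
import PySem

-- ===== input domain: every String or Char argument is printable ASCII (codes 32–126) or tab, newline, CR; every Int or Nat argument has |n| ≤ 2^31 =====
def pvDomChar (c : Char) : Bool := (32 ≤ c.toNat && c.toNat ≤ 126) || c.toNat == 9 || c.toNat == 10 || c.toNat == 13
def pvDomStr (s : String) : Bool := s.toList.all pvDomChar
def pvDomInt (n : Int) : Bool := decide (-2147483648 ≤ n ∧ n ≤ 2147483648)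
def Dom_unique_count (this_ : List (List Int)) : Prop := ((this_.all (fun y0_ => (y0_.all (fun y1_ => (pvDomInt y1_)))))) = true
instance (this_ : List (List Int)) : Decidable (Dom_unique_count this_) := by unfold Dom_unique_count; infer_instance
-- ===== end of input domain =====

-- B flattens the abs values, sorts them once, and counts adjacent-unequal boundaries in one scan, instead of A's nested loops with membership tests (alternative decomposition).


-- ===== PORT A =====
-- body of A's inner loop: 'if abs(this[i][x]) not in unique: count += 1; unique.append(abs(this[i][x]))'
def pvStep (st : List Int × Int) (v : Int) : List Int × Int :=
  if |v| ∈ st.1 then st else (st.1 ++ [|v|], st.2 + 1)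

-- A's inner loop: 'for x in range(0, len(this[i])): …'
def pvRowLoop (st : List Int × Int) (row : List Int) : List Int × Int :=
  (PySem.List.pyRange 0 (row.length : Int) 1).foldl
    (fun st x => pvStep st (PySem.List.pyGetD row x 0)) st

-- literal port of A: outer loop over i in range(0, len(this)), state (unique, count); returns len(unique)
def unique_count (this_ : List (List Int)) : Int :=
  let st :=
    (PySem.List.pyRange 0 (this_.length : Int) 1).foldl
      (fun st i => pvRowLoop st (PySem.List.pyGetD this_ i [])) ([], 0)
  (st.1.length : Int)

-- ===== PORT B =====
-- B's scan loop: walking the sorted list comparing each element with the previous one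
def pvScan (prev : Int) (rest : List Int) (count : Int) : Int :=
  match rest with
  | [] => count
  | x :: t => pvScan x t (if x ≠ prev then count + 1 else count)

-- port of Source B: sort the flattened abs values, then one pass counting adjacent changes
def unique_count_alt (this_ : List (List Int)) : Int :=
  let vals := PySem.List.sorted (this_.flatMap (fun row => row.map (fun x => |x|))) (fun x => x) false
  match vals with
  | [] => 0
  | h :: t => pvScan h t 1

-- ===== PRECONDITION & SPEC =====
def Spec_unique_count (this_ : List (List Int)) (out : Int) : Prop := out = unique_count_alt this_
instance (this_ : List (List Int)) (out : Int) : Decidable (Spec_unique_count this_ out) := by unfold Spec_unique_count; infer_instance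

-- ===== CLAIM (what is proved, stated in full; the proofs are below) =====
def Claim_equal_unique_count : Prop := ∀ (this_ : List (List Int)), Dom_unique_count this_ → Spec_unique_count this_ (unique_count this_)

-- ===== LEMMAS AND PROOFS =====

-- A's inner range loop is a fold of pvStep over the row itself
theorem pvRowLoop_eq (st : List Int × Int) (row : List Int) :
    pvRowLoop st row = row.foldl pvStep st := by
  unfold pvRowLoop
  exact PySem.List.foldl_pyRange_zero_pyGetD' row 0 pvStep st

-- one row of A's loop builds exactly foldl Set.add over the row's abs values
theorem row_fold_fst (l : List Int) (u : List Int) (c : Int) :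
    ((l.foldl pvStep (u, c)).1) = (l.map (fun x => |x|)).foldl PySem.Set.add u := by
  induction l generalizing u c with
  | nil => rfl
  | cons v t ih =>
    simp only [List.foldl_cons, List.map_cons, pvStep]
    by_cases h : |v| ∈ u
    · simpa [h, PySem.Set.add, PySem.Set.contains] using ih u c
    · simpa [h, PySem.Set.add, PySem.Set.contains] using ih (u ++ [|v|]) (c + 1)

-- A's full nested loop state, projected to unique, is foldl Set.add over the flattened abs values
theorem nested_fold_fst (rows : List (List Int)) (u : List Int) (c : Int) :
    ((rows.foldl (fun st row => row.foldl pvStep st) (u, c)).1)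
      = (rows.flatMap (fun row => row.map (fun x => |x|))).foldl PySem.Set.add u := by
  induction rows generalizing u c with
  | nil => rfl
  | cons r t ih =>
    simp only [List.foldl_cons, List.flatMap_cons, List.foldl_append]
    rcases hst : r.foldl pvStep (u, c) with ⟨u', c'⟩
    have hu : u' = (r.map (fun x => |x|)).foldl PySem.Set.add u := by
      rw [← row_fold_fst r u c, hst]
    rw [ih u' c', hu]

-- two nodup lists with the same members have the same length
theorem length_eq_of_nodup_same_mem (l l' : List Int) (h1 : l.Nodup) (h2 : l'.Nodup)
    (hm : ∀ a, a ∈ l ↔ a ∈ l') : l.length = l'.length :=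
  ((List.perm_ext_iff_of_nodup h1 h2).2 hm).length_eq

-- Set.ofList has the same length as Mathlib's dedup
theorem ofList_length_eq_dedup (l : List Int) :
    (PySem.Set.ofList l).length = l.dedup.length :=
  length_eq_of_nodup_same_mem _ _ (PySem.Set.nodup_ofList l) l.nodup_dedup
    (fun a => by simp [PySem.Set.mem_ofList, List.mem_dedup])

-- Set.ofList length is a permutation invariant
theorem ofList_length_perm (l l' : List Int) (h : l.Perm l') :
    (PySem.Set.ofList l).length = (PySem.Set.ofList l').length :=
  length_eq_of_nodup_same_mem _ _ (PySem.Set.nodup_ofList l) (PySem.Set.nodup_ofList l')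
    (fun a => by simp [PySem.Set.mem_ofList, h.mem_iff])

-- pvScan is affine in its accumulator
theorem pvScan_add (prev : Int) (t : List Int) (c d : Int) :
    pvScan prev t (c + d) = pvScan prev t c + d := by
  induction t generalizing prev c with
  | nil => rfl
  | cons x t ih =>
    simp only [pvScan]
    by_cases h : x = prev
    · simp only [h, ne_eq, not_true_eq_false, ite_false]
      exact ih prev c
    · simp only [h, ne_eq, not_false_eq_true, if_pos]
      rw [add_right_comm]
      exact ih x (c + 1)

-- on a sorted (pairwise ≤) nonempty list, the boundary scan counts the distinct elements
theorem pvScan_dedup (h : Int) (t : List Int)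
    (hp : (h :: t).Pairwise (fun a b => a ≤ b)) :
    pvScan h t 1 = ((h :: t).dedup.length : Int) := by
  induction t generalizing h with
  | nil => simp [pvScan]
  | cons x t' ih =>
    have hx : h ≤ x := (List.pairwise_cons.1 hp).1 x (by simp)
    have hp' : (x :: t').Pairwise (fun a b => a ≤ b) := (List.pairwise_cons.1 hp).2
    by_cases he : x = h
    · subst he
      simp only [pvScan, ne_eq, not_true_eq_false, ite_false]
      rw [List.dedup_cons_of_mem (List.mem_cons_self), ih x hp']
    · have hlt : h < x := lt_of_le_of_ne hx (fun he' => he he'.symm)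
      have hnm : h ∉ x :: t' := by
        intro hm
        rcases List.mem_cons.1 hm with h1 | h1
        · exact he h1.symm
        · exact absurd ((List.pairwise_cons.1 hp').1 h h1) (not_le.2 hlt)
      simp only [pvScan, he, ne_eq, not_false_eq_true, if_pos]
      rw [show (1 : Int) + 1 = 1 + 1 from rfl, pvScan_add, ih x hp',
        List.dedup_cons_of_notMem hnm]
      simp only [List.length_cons]
      push_cast
      ring

-- ===== VERDICT (by name: the statement is the Claim_ definition above) =====
theorem unique_count_spec : Claim_equal_unique_count := by
  intro this_ _
  show unique_count this_ = unique_count_alt this_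
  unfold unique_count unique_count_alt
  rw [PySem.List.foldl_pyRange_zero_pyGetD' this_ [] pvRowLoop ([], 0)]
  have hrl : pvRowLoop = fun st row => row.foldl pvStep st :=
    funext fun st => funext fun row => pvRowLoop_eq st row
  rw [hrl]
  set vals := this_.flatMap (fun row => row.map (fun x => |x|)) with hv
  have hA : ((this_.foldl (fun st row => row.foldl pvStep st) ([], 0)).1.length : Int)
      = ((PySem.Set.ofList vals).length : Int) := by
    rw [nested_fold_fst this_ [] 0, PySem.Set.ofList_eq_foldl]
  rw [hA]
  rcases hs : PySem.List.sorted vals (fun x => x) false with _ | ⟨h, t⟩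
  · have : vals = [] := (PySem.List.sorted_eq_nil_iff vals (fun x => x) false).1 hs
    simp [this, PySem.Set.ofList]
  · have hperm : (h :: t).Perm vals := hs ▸ PySem.List.sorted_perm vals (fun x => x) false
    have hp : (h :: t).Pairwise (fun a b => a ≤ b) := by
      have := PySem.List.sorted_pairwise vals (fun x => x)
      rw [hs] at this
      exact this
    rw [ofList_length_perm vals (h :: t) hperm.symm, ofList_length_eq_dedup,
      ← pvScan_dedup h t hp]
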